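-- pv_equiv track=rewrite | github.com/Elyseum/AdventOfCode2020 | day07.py | packing_options
-- ===== SOURCE A (Python) =====
-- def packing_options_direct(rules, color):
--   options = set()
--   for (rule_color, cont_bags) in rules:
--     for (cont_bag_color, _) in cont_bags:
--       if cont_bag_color == color:
--         options.add(rule_color)
--   return options
--
-- def packing_options(rules, color):
--   options = set()
--   colors_to_check = [color]
--   while len(colors_to_check) > 0:
--     color_to_check = colors_to_check.pop()
--     cur = packing_options_direct(rules, color_to_check)
--     for el in cur:
--       if el not in options:
--         options.add(el)
--         colors_to_check.append(el)
--   return options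
-- ===== SOURCE B (Python) =====
-- def packing_options(rules, color):
--   # Build a reverse-adjacency index once (contained color -> list of containers),
--   # then walk it with a stack instead of rescanning all rules per color.
--   contained_in = {}
--   for (rule_color, cont_bags) in rules:
--     for (cont_bag_color, _) in cont_bags:
--       contained_in.setdefault(cont_bag_color, []).append(rule_color)
--   options = set()
--   stack = [color]
--   while stack:
--     cur = stack.pop()
--     for el in contained_in.get(cur, []):
--       if el not in options:
--         options.add(el)
--         stack.append(el)
--   return options
-- ===== Notes on version B (the rewrite author's own statement) =====
-- stated objective: alternative
-- what changed: B builds a reverse-adjacency dict (contained color -> list of container colors) once and the worklist loop looks containers up in it, instead of A's rescan of the entire rule list for every popped color; asymptotically O(V+E) vs A's scan-per-discovered-color, though a timing run could not measure a speedup on the generated inputs.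
import Mathlib
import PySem

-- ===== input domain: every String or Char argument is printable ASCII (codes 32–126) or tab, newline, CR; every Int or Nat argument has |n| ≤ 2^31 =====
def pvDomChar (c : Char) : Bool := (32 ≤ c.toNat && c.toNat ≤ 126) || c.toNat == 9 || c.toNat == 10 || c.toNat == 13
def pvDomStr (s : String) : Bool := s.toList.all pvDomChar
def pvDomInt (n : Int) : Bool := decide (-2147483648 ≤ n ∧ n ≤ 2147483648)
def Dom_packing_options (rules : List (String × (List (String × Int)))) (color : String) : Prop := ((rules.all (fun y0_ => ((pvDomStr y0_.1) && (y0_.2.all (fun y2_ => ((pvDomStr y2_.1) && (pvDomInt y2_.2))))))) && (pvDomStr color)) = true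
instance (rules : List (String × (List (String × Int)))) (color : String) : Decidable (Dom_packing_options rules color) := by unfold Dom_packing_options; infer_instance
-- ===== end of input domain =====

-- B replaces A's per-color rescan of the whole rule list by a reverse-adjacency
-- dict built once, then walks it with the same stack (objective: alternative).
-- Both Pythons return a set; the ports list its elements in first-insertion order.

-- 'if el not in options: options.add(el); colors_to_check.append(el)' — the shared
-- body of the worklist loop, written identically in A's and B's Python sources
def pvStep (st : PySem.Set String × List String) (el : String) : PySem.Set String × List String :=
  if PySem.Set.contains st.1 el then st else (PySem.Set.add st.1 el, st.2 ++ [el])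

-- number of colors of U not yet in options: the core of the termination measure
def pvGap (U : List String) (o : PySem.Set String) : Nat :=
  (U.filter (fun x => !(PySem.Set.contains o x))).length

lemma pvGap_add_lt (U : List String) (o : PySem.Set String) (x : String)
    (hxU : x ∈ U) (hx : PySem.Set.contains o x = false) :
    pvGap U (PySem.Set.add o x) < pvGap U o := by
  unfold pvGap
  have hxo : x ∉ o := fun hm => by
    rw [(PySem.Set.contains_iff o x).2 hm] at hx; exact Bool.true_eq_false.mp hx
  have hc : ∀ y, PySem.Set.contains (PySem.Set.add o x) y
      = (PySem.Set.contains o y || (y == x)) := by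
    intro y
    rw [PySem.Set.add_eq_ite, if_neg hxo]
    simp only [PySem.Set.contains]
    simp [Bool.beq_eq_decide_eq]
  have hfe : U.filter (fun y => !(PySem.Set.contains (PySem.Set.add o x) y))
      = (U.filter (fun y => !(PySem.Set.contains o y))).filter (fun y => !(y == x)) := by
    rw [List.filter_filter]
    exact List.filter_congr (fun y _ => by rw [hc y]; simp [Bool.and_comm])
  rw [hfe]
  apply List.length_filter_lt_length_iff_exists.2
  exact ⟨x, List.mem_filter.2 ⟨hxU, by rw [hx]; rfl⟩, by simp⟩

lemma pvStep_measure (U : List String) (cur : List String)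
    (h : ∀ el ∈ cur, el ∈ U) (o : PySem.Set String) (s : List String) :
    2 * pvGap U (cur.foldl pvStep (o, s)).1 + (cur.foldl pvStep (o, s)).2.length
      ≤ 2 * pvGap U o + s.length := by
  induction cur generalizing o s with
  | nil => simp
  | cons x xs ih =>
    have hxs : ∀ el ∈ xs, el ∈ U := fun el hel => h el (List.mem_cons_of_mem _ hel)
    simp only [List.foldl_cons, pvStep]
    cases hc : PySem.Set.contains (o, s).1 x
    · rw [if_neg (by decide)]
      have hlt := pvGap_add_lt U o x (h x List.mem_cons_self) hc
      have hih := ih hxs (PySem.Set.add o x) (s ++ [x])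
      rw [List.length_append] at hih
      simp only [List.length_singleton] at hih
      omega
    · rw [if_pos rfl]
      exact ih hxs o s

-- ===== PORT A =====
-- packing_options_direct: scan every rule for bags that directly contain `color`
def packing_options_direct (rules : List (String × (List (String × Int)))) (color : String) :
    PySem.Set String :=
  rules.foldl (fun options p =>
    p.2.foldl (fun o q => if q.1 == color then PySem.Set.add o p.1 else o) options)
    PySem.Set.empty

lemma mem_packing_options_direct (rules : List (String × (List (String × Int)))) (color : String) :
    ∀ x ∈ packing_options_direct rules color, x ∈ rules.map (·.1) := by
  unfold packing_options_direct
  suffices h : ∀ (rules : List (String × (List (String × Int)))) (init : PySem.Set String),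
      ∀ x ∈ rules.foldl (fun options p =>
        p.2.foldl (fun o q => if q.1 == color then PySem.Set.add o p.1 else o) options) init,
      x ∈ init ∨ x ∈ rules.map (·.1) by
    intro x hx
    rcases h rules PySem.Set.empty x hx with h' | h'
    · simp [PySem.Set.empty] at h'
    · exact h'
  intro rules
  induction rules with
  | nil => intro init x hx; exact Or.inl hx
  | cons r rs ih =>
    intro init x hx
    simp only [List.foldl_cons] at hx
    rcases ih _ x hx with h' | h'
    · have hin : ∀ (bags : List (String × Int)) (o : PySem.Set String),
          x ∈ bags.foldl (fun o q => if q.1 == color then PySem.Set.add o r.1 else o) o →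
          x ∈ o ∨ x = r.1 := by
        intro bags
        induction bags with
        | nil => intro o ho; exact Or.inl ho
        | cons b bs ihb =>
          intro o ho
          simp only [List.foldl_cons] at ho
          rcases ihb _ ho with h2 | h2
          · by_cases hb : (b.1 == color) = true
            · rw [if_pos hb] at h2
              rcases (PySem.Set.mem_add o r.1 x).1 h2 with h3 | h3
              · exact Or.inl h3
              · exact Or.inr h3
            · rw [if_neg hb] at h2
              exact Or.inl h2
          · exact Or.inr h2
      rcases hin r.2 init h' with h2 | h2
      · exact Or.inl h2
      · exact Or.inr (by simp [h2])
    · exact Or.inr (List.mem_cons_of_mem _ h')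

-- A's while loop: pop() the last color, scan all rules for its direct containers,
-- record and push the not-yet-seen ones
def packing_options_loop (rules : List (String × (List (String × Int))))
    (options : PySem.Set String) (stack : List String) : PySem.Set String :=
  match hp : PySem.List.pop? stack with
  | none => options
  | some (c, rest) =>
    let st := (packing_options_direct rules c).foldl pvStep (options, rest)
    packing_options_loop rules st.1 st.2
termination_by 2 * pvGap (rules.map (·.1)) options + stack.length
decreasing_by
  have hlen := PySem.List.length_of_pop?_eq_some stack hp
  have h2 := pvStep_measure (rules.map (·.1)) (packing_options_direct rules c)
    (mem_packing_options_direct rules c) options rest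
  simp only [] at hlen h2 ⊢
  omega

def packing_options (rules : List (String × (List (String × Int)))) (color : String) :
    List String :=
  packing_options_loop rules PySem.Set.empty [color]

-- ===== PORT B =====
-- build the reverse-adjacency index once: contained color -> containers, in scan order
def pvRevIndex (rules : List (String × (List (String × Int)))) :
    PySem.Dict String (List String) :=
  rules.foldl (fun d p =>
    p.2.foldl (fun d q => d.modify q.1 [] (fun l => l ++ [p.1])) d)
    PySem.Dict.empty

lemma mem_getD_values_flatten (d : PySem.Dict String (List String)) (c : String) :
    ∀ el ∈ d.getD c [], el ∈ d.values.flatten := by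
  intro el hel
  rw [PySem.Dict.getD_eq_get?_getD] at hel
  cases hg : d.get? c with
  | none => rw [hg] at hel; simp at hel
  | some v =>
    rw [hg] at hel
    simp only [Option.getD_some] at hel
    have hv : v ∈ d.values :=
      List.mem_map.2 ⟨(c, v), PySem.Dict.mem_items_of_get?_eq_some d hg, rfl⟩
    exact List.mem_flatten.2 ⟨v, hv, hel⟩

-- B's while loop: pop() the last color, look its containers up in the index,
-- record and push the not-yet-seen ones
def packing_options_alt_loop (contained_in : PySem.Dict String (List String))
    (options : PySem.Set String) (stack : List String) : PySem.Set String :=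
  match hp : PySem.List.pop? stack with
  | none => options
  | some (c, rest) =>
    let st := (contained_in.getD c []).foldl pvStep (options, rest)
    packing_options_alt_loop contained_in st.1 st.2
termination_by 2 * pvGap contained_in.values.flatten options + stack.length
decreasing_by
  have hlen := PySem.List.length_of_pop?_eq_some stack hp
  have h2 := pvStep_measure contained_in.values.flatten (contained_in.getD c [])
    (mem_getD_values_flatten contained_in c) options rest
  simp only [] at hlen h2 ⊢
  omega

def packing_options_alt (rules : List (String × (List (String × Int)))) (color : String) :
    List String :=
  packing_options_alt_loop (pvRevIndex rules) PySem.Set.empty [color]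

-- ===== PRECONDITION & SPEC =====
def Spec_packing_options (rules : List (String × (List (String × Int)))) (color : String) (out : List String) : Prop := out = packing_options_alt rules color
instance (rules : List (String × (List (String × Int)))) (color : String) (out : List String) : Decidable (Spec_packing_options rules color out) := by unfold Spec_packing_options; infer_instance

-- ===== CLAIM (what is proved, stated in full; the proofs are below) =====
def Claim_equal_packing_options : Prop := ∀ (rules : List (String × (List (String × Int)))) (color : String), Dom_packing_options rules color → Spec_packing_options rules color (packing_options rules color)

-- ===== LEMMAS AND PROOFS =====

-- the flat list of (contained color, container color) pairs both ports traverse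
def pvFlat (rules : List (String × (List (String × Int)))) : List (String × String) :=
  rules.flatMap (fun p => p.2.map (fun q => (q.1, p.1)))

-- the containers of c, in scan order, with duplicates
def pvRevL (rules : List (String × (List (String × Int)))) (c : String) : List String :=
  ((pvFlat rules).filter (fun pr => pr.1 == c)).map (·.2)

lemma packing_options_direct_eq_ofList (rules : List (String × (List (String × Int))))
    (c : String) :
    packing_options_direct rules c = PySem.Set.ofList (pvRevL rules c) := by
  unfold packing_options_direct pvRevL pvFlat
  rw [PySem.Set.ofList_eq_foldl, List.foldl_map, List.foldl_filter, List.foldl_flatMap]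
  congr 1
  funext o p
  rw [List.foldl_map]

lemma pvRevIndex_getD (rules : List (String × (List (String × Int)))) (c : String) :
    (pvRevIndex rules).getD c [] = pvRevL rules c := by
  unfold pvRevIndex pvRevL pvFlat
  have hflat : rules.foldl (fun d p =>
      p.2.foldl (fun d q => d.modify q.1 [] (fun l => l ++ [p.1])) d) PySem.Dict.empty
      = (rules.flatMap (fun p => p.2.map (fun q => (q.1, p.1)))).foldl
          (fun d pr => d.modify pr.1 [] (fun l => l ++ [pr.2])) PySem.Dict.empty := by
    rw [List.foldl_flatMap]
    congr 1
    funext d p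
    rw [List.foldl_map]
  rw [hflat, PySem.Dict.getD_foldl_modify_append]
  simp [PySem.Dict.getD_empty]

lemma mem_fst_pvStep (st : PySem.Set String × List String) (el y : String)
    (h : y ∈ st.1) : y ∈ (pvStep st el).1 := by
  unfold pvStep
  split
  · exact h
  · exact (PySem.Set.mem_add st.1 el y).2 (Or.inl h)

lemma mem_fst_foldl_of_mem_st (L : List String) (st : PySem.Set String × List String)
    (y : String) (h : y ∈ st.1) : y ∈ (L.foldl pvStep st).1 := by
  induction L generalizing st with
  | nil => exact h
  | cons x xs ih => exact ih _ (mem_fst_pvStep st x y h)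

lemma mem_fst_foldl_of_mem (L : List String) (st : PySem.Set String × List String)
    (y : String) (h : y ∈ L) : y ∈ (L.foldl pvStep st).1 := by
  induction L generalizing st with
  | nil => simp at h
  | cons x xs ih =>
    rw [List.foldl_cons]
    rcases List.mem_cons.1 h with h' | h'
    · subst h'
      apply mem_fst_foldl_of_mem_st
      unfold pvStep
      split
      · exact (PySem.Set.contains_iff _ _).1 (by assumption)
      · exact (PySem.Set.mem_add st.1 y y).2 (Or.inr rfl)
    · exact ih _ h'

lemma foldl_pvStep_ofList (L : List String) (st : PySem.Set String × List String) :
    (PySem.Set.ofList L).foldl pvStep st = L.foldl pvStep st := by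
  induction L using List.reverseRecOn with
  | nil => rfl
  | append_singleton xs x ih =>
    rw [PySem.Set.ofList_append_singleton, PySem.Set.add_eq_ite]
    by_cases hx : x ∈ PySem.Set.ofList xs
    · rw [if_pos hx, ih, List.foldl_append]
      have hmem : x ∈ (xs.foldl pvStep st).1 :=
        mem_fst_foldl_of_mem xs st x ((PySem.Set.mem_ofList xs x).1 hx)
      simp only [List.foldl_cons, List.foldl_nil, pvStep,
        if_pos ((PySem.Set.contains_iff _ _).2 hmem)]
    · rw [if_neg hx, List.foldl_append, List.foldl_append, ih]

lemma loop_eq_loop_alt (rules : List (String × (List (String × Int))))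
    (options : PySem.Set String) (stack : List String) :
    packing_options_loop rules options stack
      = packing_options_alt_loop (pvRevIndex rules) options stack := by
  fun_induction packing_options_loop rules options stack with
  | case1 options stack hp =>
    rw [packing_options_alt_loop, hp]
  | case2 options stack c rest hp st ih =>
    rw [packing_options_alt_loop, hp]
    have hcur : (packing_options_direct rules c).foldl pvStep (options, rest)
        = ((pvRevIndex rules).getD c []).foldl pvStep (options, rest) := by
      rw [packing_options_direct_eq_ofList, pvRevIndex_getD, foldl_pvStep_ofList]
    simp only [← hcur]
    exact ih

-- ===== VERDICT (by name: the statement is the Claim_ definition above) =====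
theorem packing_options_spec : Claim_equal_packing_options := by
  intro rules color _
  unfold Spec_packing_options packing_options packing_options_alt
  exact loop_eq_loop_alt rules PySem.Set.empty [color]
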